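-- pv_equiv track=rewrite | github.com/xovae/COMPX216 | aima-python/assignment3.py | build_bigram
-- ===== SOURCE A (Python) =====
-- def build_bigram(sequence):
--     # Return a bigram model.
--     outer_dict = {}
--     for i in range(len(sequence) - 1):
--         #If the context is not already in the dictionary, add it
--         if sequence[i] not in outer_dict:
--             outer_dict[(sequence[i])] = {}
--
--         #Check if the following token is in the dictionary
--         following_token = sequence[i + 1]
--         if following_token in outer_dict[sequence[i]]:
--             outer_dict[sequence[i]][following_token] += 1
--         else:
--             outer_dict[sequence[i]][following_token] = 1
--
--     return outer_dict
-- ===== SOURCE B (Python) =====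
-- def build_bigram(sequence):
--     # Two-pass: flat (context, following) pair counts, then regroup into the nested dict.
--     flat = {}
--     for pair in zip(sequence, sequence[1:]):
--         flat[pair] = flat.get(pair, 0) + 1
--     result = {}
--     for (context, following), count in flat.items():
--         result.setdefault(context, {})[following] = count
--     return result
-- ===== Notes on version B (the rewrite author's own statement) =====
-- stated objective: alternative
-- what changed: A builds the nested bigram dict in one fused loop that updates inner dicts in place; B first counts adjacent (context, following) pairs into a flat dict keyed by the pair, then regroups that flat table into the nested dict in a second pass.
import Mathlib
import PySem

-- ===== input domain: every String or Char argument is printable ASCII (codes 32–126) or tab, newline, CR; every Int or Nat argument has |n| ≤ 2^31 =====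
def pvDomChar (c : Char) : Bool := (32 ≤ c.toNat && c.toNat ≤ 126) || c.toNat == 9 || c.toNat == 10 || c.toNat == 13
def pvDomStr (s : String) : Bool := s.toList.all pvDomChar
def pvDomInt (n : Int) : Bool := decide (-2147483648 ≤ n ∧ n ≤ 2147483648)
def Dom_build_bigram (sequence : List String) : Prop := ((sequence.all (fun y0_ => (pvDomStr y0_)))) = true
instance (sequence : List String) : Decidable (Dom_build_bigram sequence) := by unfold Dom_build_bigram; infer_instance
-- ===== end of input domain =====

-- B replaces A's fused nested-dict update loop by a flat pair-count pass followed by a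
-- regrouping pass (objective: alternative decomposition, same asymptotic cost).

-- ===== PORT A =====
def build_bigram (sequence : List String) : List (String × List (String × Int)) :=
  let outer : PySem.Dict String (PySem.Dict String Int) :=
    (PySem.List.pyRange 0 ((sequence.length : Int) - 1) 1).foldl
      (fun outer i =>
        let key := PySem.List.pyGetD sequence i ""
        let outer := if outer.contains key then outer else outer.insert key PySem.Dict.empty
        let following := PySem.List.pyGetD sequence (i + 1) ""
        let inner := outer.getD key PySem.Dict.empty
        if inner.contains following then
          outer.insert key (inner.insert following (inner.getD following 0 + 1))
        else
          outer.insert key (inner.insert following 1))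
      PySem.Dict.empty
  outer.items.map (fun p => (p.1, p.2.items))

-- ===== PORT B =====
def build_bigram_alt (sequence : List String) : List (String × List (String × Int)) :=
  let flat : PySem.Dict (String × String) Int :=
    (sequence.zip (sequence.drop 1)).foldl
      (fun d p => d.insert p (d.getD p 0 + 1)) PySem.Dict.empty
  let result : PySem.Dict String (PySem.Dict String Int) :=
    flat.items.foldl
      (fun r q =>
        let r := r.setdefault q.1.1 PySem.Dict.empty
        r.insert q.1.1 ((r.getD q.1.1 PySem.Dict.empty).insert q.1.2 q.2))
      PySem.Dict.empty
  result.items.map (fun p => (p.1, p.2.items))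

-- ===== PRECONDITION & SPEC =====
def Spec_build_bigram (sequence : List String) (out : List (String × List (String × Int))) : Prop := out = build_bigram_alt sequence
instance (sequence : List String) (out : List (String × List (String × Int))) : Decidable (Spec_build_bigram sequence out) := by unfold Spec_build_bigram; infer_instance

-- ===== CLAIM (what is proved, stated in full; the proofs are below) =====
def Claim_equal_build_bigram : Prop := ∀ (sequence : List String), Dom_build_bigram sequence → Spec_build_bigram sequence (build_bigram sequence)


-- ===== LEMMAS AND PROOFS =====

-- A's literal loop body, as a function of the two tokens it reads.
def pvF (d : PySem.Dict String (PySem.Dict String Int)) (key following : String) :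
    PySem.Dict String (PySem.Dict String Int) :=
  let d1 := if d.contains key then d else d.insert key PySem.Dict.empty
  let inner := d1.getD key PySem.Dict.empty
  if inner.contains following then
    d1.insert key (inner.insert following (inner.getD following 0 + 1))
  else
    d1.insert key (inner.insert following 1)

-- B's literal regrouping body.
def pvH (r : PySem.Dict String (PySem.Dict String Int)) (q : (String × String) × Int) :
    PySem.Dict String (PySem.Dict String Int) :=
  let r1 := r.setdefault q.1.1 PySem.Dict.empty
  r1.insert q.1.1 ((r1.getD q.1.1 PySem.Dict.empty).insert q.1.2 q.2)

-- A's per-step nested update, simplified to a single canonical form.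
def pvAstep (d : PySem.Dict String (PySem.Dict String Int)) (a b : String) :
    PySem.Dict String (PySem.Dict String Int) :=
  d.insert a ((d.getD a PySem.Dict.empty).insert b ((d.getD a PySem.Dict.empty).getD b 0 + 1))

-- B's regrouping step, in canonical form.
def pvGstep (r : PySem.Dict String (PySem.Dict String Int)) (q : (String × String) × Int) :
    PySem.Dict String (PySem.Dict String Int) :=
  r.insert q.1.1 ((r.getD q.1.1 PySem.Dict.empty).insert q.1.2 q.2)

def pvG (L : List ((String × String) × Int)) : PySem.Dict String (PySem.Dict String Int) :=
  L.foldl pvGstep PySem.Dict.empty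

def pvN (l : List (String × String)) : PySem.Dict String (PySem.Dict String Int) :=
  l.foldl (fun d p => pvAstep d p.1 p.2) PySem.Dict.empty

theorem pvF_eq (d : PySem.Dict String (PySem.Dict String Int)) (a b : String) :
    pvF d a b = pvAstep d a b := by
  unfold pvF pvAstep
  by_cases hc : d.contains a = true
  · simp only [hc, if_true]
    by_cases hb : (d.getD a PySem.Dict.empty).contains b = true
    · simp [hb]
    · simp only [Bool.not_eq_true] at hb
      simp [hb, PySem.Dict.getD_of_not_contains _ _ hb]
  · simp only [Bool.not_eq_true] at hc
    simp only [hc, Bool.false_eq_true, if_false]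
    rw [PySem.Dict.getD_insert_self]
    simp [PySem.Dict.contains_empty, PySem.Dict.insert_insert_self,
      PySem.Dict.getD_of_not_contains _ _ hc, PySem.Dict.getD_empty]

theorem pvH_eq (r : PySem.Dict String (PySem.Dict String Int)) (q : (String × String) × Int) :
    pvH r q = pvGstep r q := by
  unfold pvH pvGstep
  by_cases hc : r.contains q.1.1 = true
  · rw [PySem.Dict.setdefault_of_contains _ _ hc]
  · simp only [Bool.not_eq_true] at hc
    rw [PySem.Dict.setdefault_of_not_contains _ _ hc, PySem.Dict.insert_insert_self,
      PySem.Dict.getD_insert_self, PySem.Dict.getD_of_not_contains _ _ hc]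

-- pvG over an appended entry is one pvGstep.
theorem pvG_append (L : List ((String × String) × Int)) (q : (String × String) × Int) :
    pvG (L ++ [q]) = pvGstep (pvG L) q := by
  simp [pvG, List.foldl_append]

-- Two inserts at distinct keys commute when the first key is already present.
theorem pvInsert_comm {κ ν : Type} [BEq κ] [LawfulBEq κ] (d : PySem.Dict κ ν) {k k' : κ}
    (v w : ν) (h : d.contains k = true) (hne : k ≠ k') :
    (d.insert k v).insert k' w = (d.insert k' w).insert k v := by
  apply PySem.Dict.ext
  by_cases hc' : d.contains k' = true
  · rw [PySem.Dict.items_insert_of_contains _ w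
        (by simp [PySem.Dict.contains_insert, hc']),
      PySem.Dict.items_insert_of_contains _ v h,
      PySem.Dict.items_insert_of_contains _ v
        (by simp [PySem.Dict.contains_insert, h]),
      PySem.Dict.items_insert_of_contains _ w hc']
    simp only [List.map_map]
    congr 1
    funext p
    by_cases h1 : p.1 = k
    · simp [Function.comp, h1, hne]
    · by_cases h2 : p.1 = k'
      · simp [Function.comp, h2, Ne.symm hne]
      · simp [Function.comp, h1, h2]
  · simp only [Bool.not_eq_true] at hc'
    rw [PySem.Dict.items_insert_of_not_contains _ w
        (by simp [PySem.Dict.contains_insert, hc', Ne.symm hne]),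
      PySem.Dict.items_insert_of_contains _ v h,
      PySem.Dict.items_insert_of_contains _ v
        (by simp [PySem.Dict.contains_insert, h]),
      PySem.Dict.items_insert_of_not_contains _ w hc']
    simp [List.map_append, Ne.symm hne]

-- Any key pair appearing in L is present in the regrouped dict, outer and inner.
theorem pvG_keys_mem (L : List ((String × String) × Int)) {p : String × String}
    (h : p ∈ L.map (fun q => q.1)) :
    p.1 ∈ (pvG L).keys ∧ p.2 ∈ ((pvG L).getD p.1 PySem.Dict.empty).keys := by
  induction L using List.reverseRecOn with
  | nil => simp at h
  | append_singleton L q ih =>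
    rw [pvG_append]
    simp only [List.map_append, List.map_cons, List.map_nil, List.mem_append,
      List.mem_singleton] at h
    unfold pvGstep
    rcases h with h | h
    · obtain ⟨h1, h2⟩ := ih h
      refine ⟨by simp [PySem.Dict.mem_keys_insert, h1], ?_⟩
      by_cases hx : p.1 = q.1.1
      · rw [hx, PySem.Dict.getD_insert_self]
        rw [hx] at h2
        simp [PySem.Dict.mem_keys_insert, h2]
      · rw [PySem.Dict.getD_insert_of_ne _ _ _ hx]
        exact h2
    · subst h
      refine ⟨by simp [PySem.Dict.mem_keys_insert], ?_⟩
      rw [PySem.Dict.getD_insert_self]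
      simp [PySem.Dict.mem_keys_insert]

-- A pair absent from L looks up to 0 in the regrouped dict.
theorem pvG_getD_of_not_mem (L : List ((String × String) × Int)) {p : String × String}
    (h : p ∉ L.map (fun q => q.1)) :
    ((pvG L).getD p.1 PySem.Dict.empty).getD p.2 0 = 0 := by
  induction L using List.reverseRecOn with
  | nil => simp [pvG, PySem.Dict.getD_empty]
  | append_singleton L q ih =>
    simp only [List.map_append, List.map_cons, List.map_nil, List.mem_append,
      List.mem_singleton, not_or] at h
    obtain ⟨h1, h2⟩ := h
    rw [pvG_append]
    unfold pvGstep
    by_cases hx : p.1 = q.1.1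
    · rw [hx, PySem.Dict.getD_insert_self]
      have hy : p.2 ≠ q.1.2 := by
        intro hy; exact h2 (Prod.ext hx hy)
      rw [PySem.Dict.getD_insert_of_ne _ _ _ hy, ← hx]
      exact ih h1
    · rw [PySem.Dict.getD_insert_of_ne _ _ _ hx]
      exact ih h1

-- With unique keys, an entry of L looks up to its stored count.
theorem pvG_getD_of_mem (L : List ((String × String) × Int))
    (hnd : (L.map (fun q => q.1)).Nodup) {p : String × String} {c : Int}
    (hm : (p, c) ∈ L) :
    ((pvG L).getD p.1 PySem.Dict.empty).getD p.2 0 = c := by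
  induction L using List.reverseRecOn with
  | nil => simp at hm
  | append_singleton L q ih =>
    rw [pvG_append]
    simp only [List.map_append, List.map_cons, List.map_nil] at hnd
    rw [List.nodup_append] at hnd
    obtain ⟨hnd1, -, hdisj⟩ := hnd
    unfold pvGstep
    rcases List.mem_append.mp hm with h | h
    · have hpk : p ∈ List.map (fun q => q.1) L := by
        have := List.mem_map_of_mem (f := fun q => q.1) h
        simpa using this
      have hq : q.1 ≠ p := fun he =>
        (hdisj p hpk q.1 (List.mem_singleton_self _)) he.symm
      by_cases hx : p.1 = q.1.1
      · rw [hx, PySem.Dict.getD_insert_self]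
        have hy : p.2 ≠ q.1.2 := by
          intro hy
          exact hq (Prod.ext hx.symm hy.symm)
        rw [PySem.Dict.getD_insert_of_ne _ _ _ hy, ← hx]
        exact ih hnd1 h
      · rw [PySem.Dict.getD_insert_of_ne _ _ _ hx]
        exact ih hnd1 h
    · simp only [List.mem_singleton] at h
      subst h
      rw [PySem.Dict.getD_insert_self, PySem.Dict.getD_insert_self]

-- Replacing the stored count of one present key pair updates exactly that inner cell.
theorem pvG_map_replace (L : List ((String × String) × Int))
    (hnd : (L.map (fun q => q.1)).Nodup) (p : String × String) (v : Int)
    (hp : p ∈ L.map (fun q => q.1)) :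
    pvG (L.map (fun q => if q.1 == p then (p, v) else q))
      = (pvG L).insert p.1 (((pvG L).getD p.1 PySem.Dict.empty).insert p.2 v) := by
  induction L using List.reverseRecOn with
  | nil => simp at hp
  | append_singleton L q ih =>
    simp only [List.map_append, List.map_cons, List.map_nil] at hnd hp
    rw [List.nodup_append] at hnd
    obtain ⟨hnd1, -, hdisj⟩ := hnd
    rw [List.map_append]
    by_cases hq : q.1 = p
    · -- the replaced entry is the last one; the prefix is untouched
      have hmap : L.map (fun q' => if q'.1 == p then (p, v) else q') = L := by
        have := List.map_congr_left (l := L)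
          (f := fun q' => if q'.1 == p then (p, v) else q') (g := id)
          (fun x hx => by
            have hxk : x.1 ∈ List.map (fun q => q.1) L := by
              have := List.mem_map_of_mem (f := fun q => q.1) hx
              simpa using this
            have hne : x.1 ≠ p := fun he =>
              (hdisj x.1 hxk q.1 (List.mem_singleton_self _)) (he.trans hq.symm)
            simp [hne])
        rw [this, List.map_id]
      have hlast : List.map (fun q' => if q'.1 == p then (p, v) else q') [q] = [(p, v)] := by
        simp [hq]
      rw [hmap, hlast, pvG_append, pvG_append]
      unfold pvGstep
      rw [hq, PySem.Dict.getD_insert_self, PySem.Dict.insert_insert_self,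
        PySem.Dict.insert_insert_self]
    · -- the replaced entry is in the prefix
      have hp' : p ∈ List.map (fun q => q.1) L := by
        rcases List.mem_append.mp hp with h | h
        · exact h
        · simp only [List.mem_singleton] at h; exact absurd h.symm hq
      have hlast : List.map (fun q' => if q'.1 == p then (p, v) else q') [q] = [q] := by
        simp [hq]
      rw [hlast, pvG_append, pvG_append, ih hnd1 hp']
      obtain ⟨hak, hbk⟩ := pvG_keys_mem L hp'
      unfold pvGstep
      by_cases hx : q.1.1 = p.1
      · -- same context, different follower
        have hy : q.1.2 ≠ p.2 := by
          intro hy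
          exact hq (Prod.ext hx hy)
        rw [hx, PySem.Dict.getD_insert_self, PySem.Dict.getD_insert_self,
          PySem.Dict.insert_insert_self, PySem.Dict.insert_insert_self]
        congr 1
        exact pvInsert_comm _ _ _
          ((PySem.Dict.contains_iff_mem_keys _ _).mpr hbk) (Ne.symm hy)
      · -- different contexts: outer inserts commute
        rw [PySem.Dict.getD_insert_of_ne _ _ _ hx,
          PySem.Dict.getD_insert_of_ne _ _ _ (fun he => hx he.symm)]
        exact pvInsert_comm _ _ _
          ((PySem.Dict.contains_iff_mem_keys _ _).mpr hak) (fun he => hx he.symm)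

-- Main bridge: regrouping the flat pair-count table equals A's fused nested loop.
theorem pvMain (l : List (String × String)) :
    pvG (l.foldl (fun d p => d.insert p (d.getD p 0 + 1))
        (PySem.Dict.empty : PySem.Dict (String × String) Int)).items = pvN l := by
  induction l using List.reverseRecOn with
  | nil => rfl
  | append_singleton l p ih =>
    rw [List.foldl_append, List.foldl_cons, List.foldl_nil]
    set F := l.foldl (fun d p => d.insert p (d.getD p 0 + 1))
      (PySem.Dict.empty : PySem.Dict (String × String) Int) with hF
    have hnd : F.keys.Nodup := by
      rw [hF]
      exact PySem.Dict.nodup_keys_foldl_insert l (fun d p => d.getD p 0 + 1) _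
        PySem.Dict.nodup_keys_empty
    have hkeys : F.items.map (fun q => q.1) = F.keys := rfl
    have hndi : (F.items.map (fun q => q.1)).Nodup := by rw [hkeys]; exact hnd
    have hN : pvN (l ++ [p]) = pvAstep (pvN l) p.1 p.2 := by
      simp [pvN, List.foldl_append]
    rw [hN]
    by_cases hc : F.contains p = true
    · -- present pair: the flat insert rewrites one entry in place
      rw [PySem.Dict.items_insert_of_contains F _ hc]
      rw [pvG_map_replace F.items hndi p _
        (by rw [hkeys]; exact (PySem.Dict.contains_iff_mem_keys _ _).mp hc)]
      -- identify the stored count with the nested lookup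
      have hsome : ∃ c, F.get? p = some c := by
        rcases h : F.get? p with _ | c
        · exact absurd ((PySem.Dict.get?_eq_none_iff_contains F p).mp h) (by simp [hc])
        · exact ⟨c, rfl⟩
      obtain ⟨c, hcv⟩ := hsome
      have hmem : (p, c) ∈ F.items := PySem.Dict.mem_items_of_get?_eq_some _ hcv
      have hFgetD : F.getD p 0 = c := by
        rw [PySem.Dict.getD_eq_get?_getD, hcv]; rfl
      have hnested : ((pvG F.items).getD p.1 PySem.Dict.empty).getD p.2 0 = c :=
        pvG_getD_of_mem F.items hndi hmem
      rw [ih] at hnested ⊢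
      rw [hFgetD, ← hnested]
      rfl
    · -- fresh pair: the flat insert appends a new entry
      simp only [Bool.not_eq_true] at hc
      rw [PySem.Dict.items_insert_of_not_contains F _ hc, pvG_append]
      have hnot : p ∉ F.items.map (fun q => q.1) := by
        rw [hkeys]
        intro hmem
        rw [← PySem.Dict.contains_iff_mem_keys] at hmem
        simp [hc] at hmem
      have h0 : ((pvG F.items).getD p.1 PySem.Dict.empty).getD p.2 0 = 0 :=
        pvG_getD_of_not_mem F.items hnot
      rw [PySem.Dict.getD_of_not_contains _ _ hc]
      rw [ih] at h0 ⊢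
      unfold pvGstep pvAstep
      rw [h0]

-- The index loop over range(len-1) is the fold over adjacent pairs (Nat form).
theorem pvLoopNat {D : Type} (f : D → String → String → D) :
    ∀ (xs : List String) (init : D),
    (List.range (xs.length - 1)).foldl (fun d k => f d (xs.getD k "") (xs.getD (k + 1) "")) init
      = (xs.zip (xs.drop 1)).foldl (fun d p => f d p.1 p.2) init
  | [], _ => by simp
  | [x], _ => by simp
  | x :: y :: t, init => by
    have ih := pvLoopNat f (y :: t) (f init x y)
    simp only [List.length_cons, Nat.add_sub_cancel, List.drop_succ_cons, List.drop_zero,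
      List.zip_cons_cons, List.foldl_cons] at ih ⊢
    rw [List.range_succ_eq_map, List.foldl_cons, List.foldl_map]
    simpa using ih

-- Int form, matching A's pyRange/pyGetD loop.
theorem pvLoop {D : Type} (f : D → String → String → D) (xs : List String) (init : D) :
    (PySem.List.pyRange 0 ((xs.length : Int) - 1) 1).foldl
        (fun d i => f d (PySem.List.pyGetD xs i "") (PySem.List.pyGetD xs (i + 1) "")) init
      = (xs.zip (xs.drop 1)).foldl (fun d p => f d p.1 p.2) init := by
  have htn : (((xs.length : Int) - 1) - 0).toNat = xs.length - 1 := by omega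
  rw [PySem.List.pyRange_one, htn, List.foldl_map]
  refine Eq.trans ?_ (pvLoopNat f xs init)
  congr 1
  funext d k
  show f d (PySem.List.pyGetD xs (0 + (k : Int)) "")
      (PySem.List.pyGetD xs (0 + (k : Int) + 1) "") = _
  have h1 : (0 + (k : Int)) = ((k : Nat) : Int) := by omega
  have h2 : ((k : Int) + 1) = (((k + 1 : Nat)) : Int) := by push_cast; ring
  rw [h1, h2, PySem.List.pyGetD_natCast, PySem.List.pyGetD_natCast]

-- ===== VERDICT (by name: the statement is the Claim_ definition above) =====
theorem build_bigram_spec : Claim_equal_build_bigram := by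
  intro seq _
  unfold Spec_build_bigram
  have hA : build_bigram seq
      = (pvN (seq.zip (seq.drop 1))).items.map (fun p => (p.1, p.2.items)) := by
    have h1 : build_bigram seq
        = ((PySem.List.pyRange 0 ((seq.length : Int) - 1) 1).foldl
            (fun d i => pvF d (PySem.List.pyGetD seq i "") (PySem.List.pyGetD seq (i + 1) ""))
            PySem.Dict.empty).items.map (fun p => (p.1, p.2.items)) := rfl
    rw [h1, pvLoop pvF seq PySem.Dict.empty]
    have h2 : (fun (d : PySem.Dict String (PySem.Dict String Int)) (p : String × String) =>
        pvF d p.1 p.2) = (fun d p => pvAstep d p.1 p.2) := by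
      funext d p
      exact pvF_eq d p.1 p.2
    rw [h2]
    rfl
  have hB : build_bigram_alt seq
      = (pvG ((seq.zip (seq.drop 1)).foldl
          (fun d p => d.insert p (d.getD p 0 + 1)) PySem.Dict.empty).items).items.map
          (fun p => (p.1, p.2.items)) := by
    have h1 : build_bigram_alt seq
        = (((seq.zip (seq.drop 1)).foldl
            (fun d p => d.insert p (d.getD p 0 + 1)) PySem.Dict.empty).items.foldl
            pvH PySem.Dict.empty).items.map (fun p => (p.1, p.2.items)) := rfl
    rw [h1]
    have h2 : pvH = pvGstep := by
      funext r q
      exact pvH_eq r q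
    rw [h2]
    rfl
  rw [hA, hB, pvMain]
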